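-- pv_equiv track=rewrite | github.com/JXPJXT/MiniProjectsTraining | 9.OCR/utils.py | format_dl_fields
-- ===== SOURCE A (Python) =====
-- from typing import Dict, Tuple, Optional
--
-- def format_dl_fields(extracted: Dict) -> Dict[str, str]:
--     """
--     Normalize and format extracted DL fields.
--     Ensures consistent field naming and formatting.
--     """
--     # Standard field names for Indian DL
--     field_mapping = {
--         "name": ["name", "holder_name", "full_name", "applicant"],
--         "date_of_birth": ["dob", "date_of_birth", "birth_date", "d.o.b"],
--         "issued_by": ["issued_by", "issuing_authority", "rto", "authority"],
--         "date_of_issue": ["doi", "date_of_issue", "issue_date", "valid_from"],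
--         "date_of_expiry": ["doe", "date_of_expiry", "expiry_date", "valid_till", "valid_upto"],
--         "license_number": ["dl_no", "license_number", "licence_no", "dl_number"],
--         "address": ["address", "permanent_address", "addr"],
--         "blood_group": ["blood_group", "blood", "bg"],
--         "vehicle_class": ["cov", "vehicle_class", "class_of_vehicle", "vehicle_type"]
--     }
--
--     formatted = {}
--     extracted_lower = {k.lower().replace(" ", "_"): v for k, v in extracted.items()}
--
--     for standard_name, aliases in field_mapping.items():
--         for alias in aliases:
--             if alias in extracted_lower and extracted_lower[alias]:
--                 formatted[standard_name] = str(extracted_lower[alias]).strip()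
--                 break
--         if standard_name not in formatted:
--             formatted[standard_name] = ""
--
--     return formatted
-- ===== SOURCE B (Python) =====
-- FIELD_MAPPING = {
--     "name": ["name", "holder_name", "full_name", "applicant"],
--     "date_of_birth": ["dob", "date_of_birth", "birth_date", "d.o.b"],
--     "issued_by": ["issued_by", "issuing_authority", "rto", "authority"],
--     "date_of_issue": ["doi", "date_of_issue", "issue_date", "valid_from"],
--     "date_of_expiry": ["doe", "date_of_expiry", "expiry_date", "valid_till", "valid_upto"],
--     "license_number": ["dl_no", "license_number", "licence_no", "dl_number"],
--     "address": ["address", "permanent_address", "addr"],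
--     "blood_group": ["blood_group", "blood", "bg"],
--     "vehicle_class": ["cov", "vehicle_class", "class_of_vehicle", "vehicle_type"],
-- }
-- # inverted index: alias -> (standard field, priority = position in the alias list)
-- ALIAS_INDEX = {alias: (field, i)
--                for field, aliases in FIELD_MAPPING.items()
--                for i, alias in enumerate(aliases)}
--
-- def format_dl_fields(extracted):
--     """Normalize and format extracted DL fields (single pass over the input)."""
--     extracted_lower = {k.lower().replace(" ", "_"): v for k, v in extracted.items()}
--     result = {field: "" for field in FIELD_MAPPING}
--     best = {}
--     for key, value in extracted_lower.items():
--         hit = ALIAS_INDEX.get(key)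
--         if hit and value:
--             field, idx = hit
--             if field not in best or idx < best[field]:
--                 result[field] = str(value).strip()
--                 best[field] = idx
--     return result
-- ===== Notes on version B (the rewrite author's own statement) =====
-- stated objective: alternative
-- what changed: Replaces A's nested scan (for each standard field, probe every alias against the extracted dict) by a precomputed inverted alias->(field,priority) index and a single pass over the extracted items that keeps, per field, the value of the lowest-priority-index truthy alias.
import Mathlib
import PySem

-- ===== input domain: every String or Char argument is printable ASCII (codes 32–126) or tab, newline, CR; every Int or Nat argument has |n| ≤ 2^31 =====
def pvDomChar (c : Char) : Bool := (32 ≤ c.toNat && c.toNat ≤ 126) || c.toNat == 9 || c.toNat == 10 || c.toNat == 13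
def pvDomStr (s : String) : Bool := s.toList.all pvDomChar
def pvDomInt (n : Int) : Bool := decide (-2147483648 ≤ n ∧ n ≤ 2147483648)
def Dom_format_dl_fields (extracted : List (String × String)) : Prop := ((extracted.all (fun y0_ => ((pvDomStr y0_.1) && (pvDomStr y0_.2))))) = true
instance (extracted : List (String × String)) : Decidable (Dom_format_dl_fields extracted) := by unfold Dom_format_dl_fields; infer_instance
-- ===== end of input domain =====

set_option maxRecDepth 1000000

-- B replaces A's per-field probing of every alias by a precomputed inverted alias->(field, priority) index
-- and a single pass over the extracted items (objective: alternative decomposition, same result).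

-- ===== PORT A =====
def pvFieldMapping : List (String × List String) :=
  [("name", ["name", "holder_name", "full_name", "applicant"]),
   ("date_of_birth", ["dob", "date_of_birth", "birth_date", "d.o.b"]),
   ("issued_by", ["issued_by", "issuing_authority", "rto", "authority"]),
   ("date_of_issue", ["doi", "date_of_issue", "issue_date", "valid_from"]),
   ("date_of_expiry", ["doe", "date_of_expiry", "expiry_date", "valid_till", "valid_upto"]),
   ("license_number", ["dl_no", "license_number", "licence_no", "dl_number"]),
   ("address", ["address", "permanent_address", "addr"]),
   ("blood_group", ["blood_group", "blood", "bg"]),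
   ("vehicle_class", ["cov", "vehicle_class", "class_of_vehicle", "vehicle_type"])]

-- k.lower().replace(" ", "_")
def pvNormKey (k : String) : String := PySem.Str.replace (PySem.Str.lower k) " " "_"

-- the inner 'for alias in aliases: … break' loop of A
def pvScanAliases (el : PySem.Dict String String) : List String → Option String
  | [] => none
  | a :: rest =>
    match el.get? a with
    | some v => if v ≠ "" then some v else pvScanAliases el rest
    | none => pvScanAliases el rest

def pvStepA (el : PySem.Dict String String) (fm : PySem.Dict String String)
    (fp : String × List String) : PySem.Dict String String :=
  let fm' := match pvScanAliases el fp.2 with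
    | some v => fm.insert fp.1 (PySem.Str.strip v)
    | none => fm
  if fm'.contains fp.1 then fm' else fm'.insert fp.1 ""

def format_dl_fields (extracted : List (String × String)) : List (String × String) :=
  let extractedLower : PySem.Dict String String :=
    extracted.foldl (fun d p => d.insert (pvNormKey p.1) p.2) PySem.Dict.empty
  let formatted : PySem.Dict String String :=
    pvFieldMapping.foldl (pvStepA extractedLower) PySem.Dict.empty
  formatted.items

-- ===== PORT B =====
-- ALIAS_INDEX = {alias: (field, i) for field, aliases in FIELD_MAPPING.items() for i, alias in enumerate(aliases)}
def pvAliasIndex : PySem.Dict String (String × Int) :=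
  PySem.Dict.ofList (pvFieldMapping.flatMap (fun fp =>
    (PySem.List.enumerate fp.2).map (fun ia => (ia.2, (fp.1, ia.1)))))

-- body of B's single loop over extracted_lower.items()
def pvStepB (st : PySem.Dict String String × PySem.Dict String Int)
    (kv : String × String) : PySem.Dict String String × PySem.Dict String Int :=
  match pvAliasIndex.get? kv.1 with
  | some fi =>
    if kv.2 ≠ "" then
      match st.2.get? fi.1 with
      | some b =>
        if fi.2 < b then (st.1.insert fi.1 (PySem.Str.strip kv.2), st.2.insert fi.1 fi.2) else st
      | none => (st.1.insert fi.1 (PySem.Str.strip kv.2), st.2.insert fi.1 fi.2)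
    else st
  | none => st

def format_dl_fields_alt (extracted : List (String × String)) : List (String × String) :=
  let extractedLower : PySem.Dict String String :=
    extracted.foldl (fun d p => d.insert (pvNormKey p.1) p.2) PySem.Dict.empty
  let result0 : PySem.Dict String String :=
    pvFieldMapping.foldl (fun d fp => d.insert fp.1 "") PySem.Dict.empty
  let st := extractedLower.items.foldl pvStepB (result0, PySem.Dict.empty)
  st.1.items

-- ===== PRECONDITION & SPEC =====
def Spec_format_dl_fields (extracted : List (String × String)) (out : List (String × String)) : Prop := out = format_dl_fields_alt extracted
instance (extracted : List (String × String)) (out : List (String × String)) : Decidable (Spec_format_dl_fields extracted out) := by unfold Spec_format_dl_fields; infer_instance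

-- ===== CLAIM (what is proved, stated in full; the proofs are below) =====
def Claim_equal_format_dl_fields : Prop := ∀ (extracted : List (String × String)), Dom_format_dl_fields extracted → Spec_format_dl_fields extracted (format_dl_fields extracted)

-- ===== LEMMAS AND PROOFS =====

-- per-field value of A's scan
def pvAVal (el : PySem.Dict String String) (fp : String × List String) : String :=
  match pvScanAliases el fp.2 with
  | some v => PySem.Str.strip v
  | none => ""

-- per-field projection of B's loop state: best-index guard
def pvBOk (b : Option Int) (i : Int) : Bool :=
  match b with
  | none => true
  | some j => decide (i < j)

-- B's loop, projected to the single field f: (current value, current best index)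
def pvFF (f : String) : (String × Option Int) → List (String × String) → (String × Option Int)
  | cb, [] => cb
  | cb, kv :: p =>
    match pvAliasIndex.get? kv.1 with
    | some fi =>
      if fi.1 = f ∧ kv.2 ≠ "" ∧ pvBOk cb.2 fi.2 = true then
        pvFF f (PySem.Str.strip kv.2, some fi.2) p
      else pvFF f cb p
    | none => pvFF f cb p

def pvTakeB (L : List String) : Option Int → List String
  | none => L
  | some j => L.take j.toNat

-- the facts about pvAliasIndex that the per-field argument needs (decidable, literal data)
abbrev pvFieldOK (f : String) (L : List String) : Prop :=
  L.Nodup ∧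
  (∀ n ∈ List.range L.length, pvAliasIndex.get? (L.getD n "") = some (f, (n : Int))) ∧
  (∀ q ∈ pvAliasIndex.items, q.2.1 = f →
    ∃ n ∈ List.range L.length, q.2.2 = ((n : Nat) : Int) ∧ q.1 = L.getD n "")

set_option maxHeartbeats 1000000 in
lemma pvFieldOK_all : ∀ fp ∈ pvFieldMapping, pvFieldOK fp.1 fp.2 := by decide

lemma pvScan_nil (L : List String) : pvScanAliases (PySem.Dict.mk []) L = none := by
  induction L with
  | nil => rfl
  | cons a rest ih => simp [pvScanAliases, PySem.Dict.get?, ih]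

lemma pvScan_cons_not_mem (kv : String × String) (p : List (String × String)) (L : List String)
    (h : kv.1 ∉ L) :
    pvScanAliases (PySem.Dict.mk (kv :: p)) L = pvScanAliases (PySem.Dict.mk p) L := by
  induction L with
  | nil => rfl
  | cons a rest ih =>
    simp only [List.mem_cons, not_or] at h
    have hg : (PySem.Dict.mk (kv :: p)).get? a = (PySem.Dict.mk p).get? a := by
      rw [PySem.Dict.get?_mk_cons]
      simp [show (kv.1 == a) = false from by simpa using h.1]
    simp only [pvScanAliases, hg]
    cases hv : (PySem.Dict.mk p).get? a with
    | none => exact ih h.2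
    | some v => by_cases hv' : v = "" <;> simp [hv', ih h.2]

lemma pvScan_cons_falsy (kv : String × String) (p : List (String × String)) (L : List String)
    (h2 : kv.2 = "") (hk : kv.1 ∉ p.map Prod.fst) :
    pvScanAliases (PySem.Dict.mk (kv :: p)) L = pvScanAliases (PySem.Dict.mk p) L := by
  induction L with
  | nil => rfl
  | cons a rest ih =>
    by_cases ha : kv.1 = a
    · have hg1 : (PySem.Dict.mk (kv :: p)).get? a = some kv.2 := by
        rw [PySem.Dict.get?_mk_cons]; simp [ha]
      have hg2 : (PySem.Dict.mk p).get? a = none := by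
        rw [PySem.Dict.get?_eq_none_iff_not_mem_keys]
        simpa [PySem.Dict.keys, ← ha] using hk
      simp [pvScanAliases, hg1, hg2, h2, ih]
    · have hg : (PySem.Dict.mk (kv :: p)).get? a = (PySem.Dict.mk p).get? a := by
        rw [PySem.Dict.get?_mk_cons]; simp [show (kv.1 == a) = false from by simpa using ha]
      simp only [pvScanAliases, hg]
      cases hv : (PySem.Dict.mk p).get? a with
      | none => exact ih
      | some v => by_cases hv' : v = "" <;> simp [hv', ih]

lemma pvScan_cons_found (kv : String × String) (p : List (String × String)) (L1 L2 : List String)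
    (h2 : kv.2 ≠ "") (h1 : kv.1 ∉ L1) :
    pvScanAliases (PySem.Dict.mk (kv :: p)) (L1 ++ kv.1 :: L2) =
      (match pvScanAliases (PySem.Dict.mk p) L1 with
       | some v => some v
       | none => some kv.2) := by
  induction L1 with
  | nil =>
    have hg : (PySem.Dict.mk (kv :: p)).get? kv.1 = some kv.2 := by
      rw [PySem.Dict.get?_mk_cons]; simp
    simp [pvScanAliases, hg, h2]
  | cons a rest ih =>
    simp only [List.mem_cons, not_or] at h1
    have hg : (PySem.Dict.mk (kv :: p)).get? a = (PySem.Dict.mk p).get? a := by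
      rw [PySem.Dict.get?_mk_cons]
      simp [show (kv.1 == a) = false from by simpa using h1.1]
    simp only [List.cons_append, pvScanAliases, hg]
    cases hv : (PySem.Dict.mk p).get? a with
    | none => exact ih h1.2
    | some v => by_cases hv' : v = "" <;> simp [hv', ih h1.2]

lemma pvFF_cons_none {f : String} {cb : String × Option Int} {kv : String × String}
    {p : List (String × String)} (hA : pvAliasIndex.get? kv.1 = none) :
    pvFF f cb (kv :: p) = pvFF f cb p := by
  simp only [pvFF, hA]

lemma pvFF_cons_hit {f : String} {cb : String × Option Int} {kv : String × String}
    {p : List (String × String)} {fi : String × Int} (hA : pvAliasIndex.get? kv.1 = some fi)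
    (hc : fi.1 = f ∧ kv.2 ≠ "" ∧ pvBOk cb.2 fi.2 = true) :
    pvFF f cb (kv :: p) = pvFF f (PySem.Str.strip kv.2, some fi.2) p := by
  simp only [pvFF, hA]
  rw [if_pos hc]

lemma pvFF_cons_skip {f : String} {cb : String × Option Int} {kv : String × String}
    {p : List (String × String)} {fi : String × Int} (hA : pvAliasIndex.get? kv.1 = some fi)
    (hc : ¬(fi.1 = f ∧ kv.2 ≠ "" ∧ pvBOk cb.2 fi.2 = true)) :
    pvFF f cb (kv :: p) = pvFF f cb p := by
  simp only [pvFF, hA]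
  rw [if_neg hc]

-- the main per-field lemma: B's projected loop computes A's bounded alias scan
lemma pvM (f : String) (L : List String) (hOK : pvFieldOK f L) :
    ∀ (p : List (String × String)), (p.map Prod.fst).Nodup → ∀ (cur : String) (b : Option Int),
    (pvFF f (cur, b) p).1 =
      (match pvScanAliases (PySem.Dict.mk p) (pvTakeB L b) with
       | some v => PySem.Str.strip v
       | none => cur) := by
  obtain ⟨hLnd, hIdx, hItems⟩ := hOK
  have hIdx' : ∀ (n : Nat) (hn : n < L.length), pvAliasIndex.get? L[n] = some (f, (n : Int)) := by
    intro n hn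
    have h := hIdx n (List.mem_range.mpr hn)
    rwa [List.getD_eq_getElem _ _ hn] at h
  have hTakeNotMem : ∀ (n m : Nat) (hn : n < L.length), m ≤ n → L[n] ∉ L.take m := by
    intro n m hn hmn hmem
    obtain ⟨j, hj, he⟩ := List.mem_take_iff_getElem.mp hmem
    have : j = n := (List.Nodup.getElem_inj_iff hLnd).mp he
    omega
  intro p
  induction p with
  | nil =>
    intro _ cur b
    simp [pvFF, pvScan_nil]
  | cons kv p ih =>
    intro hnd cur b
    simp only [List.map_cons, List.nodup_cons] at hnd
    cases hA : pvAliasIndex.get? kv.1 with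
    | none =>
      have hnl : kv.1 ∉ pvTakeB L b := by
        intro hmem
        have hmem' : kv.1 ∈ L := by
          cases b with
          | none => exact hmem
          | some j => exact List.take_subset _ _ hmem
        obtain ⟨n, hn, he⟩ := List.mem_iff_getElem.mp hmem'
        rw [← he] at hA
        rw [hIdx' n hn] at hA
        simp at hA
      rw [pvFF_cons_none hA, ih hnd.2 cur b, pvScan_cons_not_mem _ _ _ hnl]
    | some fi =>
      by_cases hf : fi.1 = f
      · have hmemI : (kv.1, fi) ∈ pvAliasIndex.items := PySem.Dict.mem_items_of_get?_eq_some _ hA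
        obtain ⟨n, hnr, hfi2, hk1⟩ := hItems _ hmemI hf
        have hn : n < L.length := List.mem_range.mp hnr
        have hk1' : kv.1 = L[n] := by rwa [List.getD_eq_getElem _ _ hn] at hk1
        by_cases h2 : kv.2 = ""
        · rw [pvFF_cons_skip hA (by simp [h2]), ih hnd.2 cur b,
              pvScan_cons_falsy _ _ _ h2 hnd.1]
        · have hupd : ∀ (bn : Nat), n < bn →
              pvScanAliases (PySem.Dict.mk (kv :: p)) (L.take bn) =
                (match pvScanAliases (PySem.Dict.mk p) (L.take n) with
                 | some v => some v
                 | none => some kv.2) := by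
            intro bn hbn
            have hnT : n < (L.take bn).length := by
              rw [List.length_take]; omega
            have hdec : L.take bn = L.take n ++ kv.1 :: (L.take bn).drop (n + 1) := by
              conv_lhs => rw [← List.take_append_drop n (L.take bn)]
              rw [List.take_take, min_eq_left (by omega), List.drop_eq_getElem_cons hnT,
                  List.getElem_take, ← hk1']
            rw [hdec, pvScan_cons_found _ _ _ _ h2 (hk1' ▸ hTakeNotMem n n hn le_rfl)]
          cases b with
          | none =>
            rw [pvFF_cons_hit hA ⟨hf, h2, by simp [pvBOk]⟩]
            rw [ih hnd.2 (PySem.Str.strip kv.2) (some fi.2), hfi2]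
            rw [show pvTakeB L (some ((n : Nat) : Int)) = L.take n from by simp [pvTakeB]]
            rw [show pvTakeB L none = L.take L.length from by simp [pvTakeB]]
            rw [hupd L.length hn]
            cases pvScanAliases (PySem.Dict.mk p) (L.take n) <;> simp
          | some j =>
            by_cases hlt : fi.2 < j
            · have hnj : n < j.toNat := by rw [hfi2] at hlt; omega
              rw [pvFF_cons_hit hA ⟨hf, h2, by simp [pvBOk, hlt]⟩]
              rw [ih hnd.2 (PySem.Str.strip kv.2) (some fi.2), hfi2]
              rw [show pvTakeB L (some ((n : Nat) : Int)) = L.take n from by simp [pvTakeB]]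
              rw [show pvTakeB L (some j) = L.take j.toNat from rfl]
              rw [hupd j.toNat hnj]
              cases pvScanAliases (PySem.Dict.mk p) (L.take n) <;> simp
            · have hjn : j.toNat ≤ n := by rw [hfi2] at hlt; omega
              rw [pvFF_cons_skip hA (by simp [pvBOk, hlt])]
              rw [ih hnd.2 cur (some j)]
              rw [pvScan_cons_not_mem _ _ _ (show kv.1 ∉ pvTakeB L (some j) from by
                rw [show pvTakeB L (some j) = L.take j.toNat from rfl, hk1']
                exact hTakeNotMem n j.toNat hn hjn)]
      · have hnl : kv.1 ∉ pvTakeB L b := by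
          intro hmem
          have hmem' : kv.1 ∈ L := by
            cases b with
            | none => exact hmem
            | some j => exact List.take_subset _ _ hmem
          obtain ⟨n, hn, he⟩ := List.mem_iff_getElem.mp hmem'
          rw [← he] at hA
          rw [hIdx' n hn] at hA
          apply hf
          rw [← Option.some.inj hA]
        rw [pvFF_cons_skip hA (fun h => hf h.1), ih hnd.2 cur b, pvScan_cons_not_mem _ _ _ hnl]


-- projection of B's fold to a single field
lemma pvProj (f : String) :
    ∀ (p : List (String × String)) (st : PySem.Dict String String × PySem.Dict String Int),
    ((p.foldl pvStepB st).1.getD f "", (p.foldl pvStepB st).2.get? f) =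
      pvFF f (st.1.getD f "", st.2.get? f) p := by
  intro p
  induction p with
  | nil => intro st; rfl
  | cons kv p ih =>
    intro st
    simp only [List.foldl_cons]
    cases hA : pvAliasIndex.get? kv.1 with
    | none =>
      rw [pvFF_cons_none hA]
      rw [show pvStepB st kv = st from by unfold pvStepB; rw [hA]]
      exact ih st
    | some fi =>
      by_cases h2 : kv.2 = ""
      · rw [pvFF_cons_skip hA (by simp [h2])]
        rw [show pvStepB st kv = st from by unfold pvStepB; rw [hA]; simp [h2]]
        exact ih st
      · by_cases hf : fi.1 = f
        · subst hf
          cases hb : st.2.get? fi.1 with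
          | none =>
            rw [show pvStepB st kv = (st.1.insert fi.1 (PySem.Str.strip kv.2), st.2.insert fi.1 fi.2) from by
              unfold pvStepB; rw [hA]; simp [h2, hb]]
            rw [pvFF_cons_hit hA ⟨rfl, h2, by simp [pvBOk]⟩]
            rw [ih]
            simp [PySem.Dict.getD_insert_self, PySem.Dict.get?_insert_self]
          | some b =>
            by_cases hlt : fi.2 < b
            · rw [show pvStepB st kv = (st.1.insert fi.1 (PySem.Str.strip kv.2), st.2.insert fi.1 fi.2) from by
                unfold pvStepB; rw [hA]; simp [h2, hb, hlt]]
              rw [pvFF_cons_hit hA ⟨rfl, h2, by simp [pvBOk, hlt]⟩]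
              rw [ih]
              simp [PySem.Dict.getD_insert_self, PySem.Dict.get?_insert_self]
            · rw [show pvStepB st kv = st from by unfold pvStepB; rw [hA]; simp [h2, hb, hlt]]
              rw [pvFF_cons_skip hA (by simp [pvBOk, hlt])]
              rw [ih st, hb]
        · have hne : f ≠ fi.1 := fun e => hf e.symm
          rw [pvFF_cons_skip hA (by intro h; exact hf h.1)]
          cases hb : st.2.get? fi.1 with
          | none =>
            rw [show pvStepB st kv = (st.1.insert fi.1 (PySem.Str.strip kv.2), st.2.insert fi.1 fi.2) from by
              unfold pvStepB; rw [hA]; simp [h2, hb]]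
            rw [ih]
            rw [PySem.Dict.getD_insert_of_ne _ _ _ hne, PySem.Dict.get?_insert_of_ne _ _ hne]
          | some b =>
            by_cases hlt : fi.2 < b
            · rw [show pvStepB st kv = (st.1.insert fi.1 (PySem.Str.strip kv.2), st.2.insert fi.1 fi.2) from by
                unfold pvStepB; rw [hA]; simp [h2, hb, hlt]]
              rw [ih]
              rw [PySem.Dict.getD_insert_of_ne _ _ _ hne, PySem.Dict.get?_insert_of_ne _ _ hne]
            · rw [show pvStepB st kv = st from by unfold pvStepB; rw [hA]; simp [h2, hb, hlt]]
              exact ih st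

-- B's value-dict keys never change
lemma pvKeysB :
    ∀ (p : List (String × String)) (st : PySem.Dict String String × PySem.Dict String Int),
    (∀ q ∈ pvAliasIndex.items, st.1.contains q.2.1 = true) →
    (p.foldl pvStepB st).1.keys = st.1.keys := by
  intro p
  induction p with
  | nil => intro st _; rfl
  | cons kv p ih =>
    intro st h
    simp only [List.foldl_cons]
    cases hA : pvAliasIndex.get? kv.1 with
    | none =>
      rw [show pvStepB st kv = st from by unfold pvStepB; rw [hA]]
      exact ih st h
    | some fi =>
      have hmem : (kv.1, fi) ∈ pvAliasIndex.items := PySem.Dict.mem_items_of_get?_eq_some _ hA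
      have hc : st.1.contains fi.1 = true := h _ hmem
      have hkeys : ∀ v : String, (st.1.insert fi.1 v).keys = st.1.keys := by
        intro v; exact PySem.Dict.keys_insert_of_contains _ _ hc
      have hpres : ∀ v : String, ∀ q ∈ pvAliasIndex.items, (st.1.insert fi.1 v).contains q.2.1 = true := by
        intro v q hq; rw [PySem.Dict.contains_insert]; simp [h q hq]
      by_cases h2 : kv.2 = ""
      · rw [show pvStepB st kv = st from by unfold pvStepB; rw [hA]; simp [h2]]
        exact ih st h
      · cases hb : st.2.get? fi.1 with
        | none =>
          rw [show pvStepB st kv = (st.1.insert fi.1 (PySem.Str.strip kv.2), st.2.insert fi.1 fi.2) from by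
            unfold pvStepB; rw [hA]; simp [h2, hb]]
          rw [ih _ (hpres _)]
          exact hkeys _
        | some b =>
          by_cases hlt : fi.2 < b
          · rw [show pvStepB st kv = (st.1.insert fi.1 (PySem.Str.strip kv.2), st.2.insert fi.1 fi.2) from by
              unfold pvStepB; rw [hA]; simp [h2, hb, hlt]]
            rw [ih _ (hpres _)]
            exact hkeys _
          · rw [show pvStepB st kv = st from by unfold pvStepB; rw [hA]; simp [h2, hb, hlt]]
            exact ih st h

-- A's fold appends one entry per field
lemma pvItemsA (el : PySem.Dict String String) :
    ∀ (l : List (String × List String)) (fm : PySem.Dict String String),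
    (∀ fp ∈ l, fm.contains fp.1 = false) → (l.map Prod.fst).Nodup →
    (l.foldl (pvStepA el) fm).items = fm.items ++ l.map (fun fp => (fp.1, pvAVal el fp)) := by
  intro l
  induction l with
  | nil => intro fm _ _; simp
  | cons fp l ih =>
    intro fm hfresh hnd
    simp only [List.foldl_cons, List.map_cons]
    have hc : fm.contains fp.1 = false := hfresh fp (by simp)
    have hstep : pvStepA el fm fp = fm.insert fp.1 (pvAVal el fp) := by
      unfold pvStepA pvAVal
      cases hs : pvScanAliases el fp.2 with
      | some v => simp [PySem.Dict.contains_insert_self]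
      | none => simp [hc]
    rw [hstep]
    simp only [List.map_cons, List.nodup_cons] at hnd
    have hfresh' : ∀ q ∈ l, (fm.insert fp.1 (pvAVal el fp)).contains q.1 = false := by
      intro q hq
      rw [PySem.Dict.contains_insert]
      have hne : q.1 ≠ fp.1 := by
        intro e
        exact hnd.1 (e ▸ List.mem_map_of_mem hq)
      simp [hne, hfresh q (by simp [hq])]
    rw [ih _ hfresh' hnd.2]
    rw [PySem.Dict.items_insert_of_not_contains _ _ hc]
    simp

-- ===== VERDICT (by name: the statement is the Claim_ definition above) =====
theorem format_dl_fields_spec : Claim_equal_format_dl_fields := by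
  unfold Claim_equal_format_dl_fields
  intro extracted _
  unfold Spec_format_dl_fields format_dl_fields format_dl_fields_alt
  show (pvFieldMapping.foldl
      (pvStepA (extracted.foldl (fun d p => d.insert (pvNormKey p.1) p.2) PySem.Dict.empty))
      PySem.Dict.empty).items =
    (((extracted.foldl (fun d p => d.insert (pvNormKey p.1) p.2) PySem.Dict.empty).items.foldl
        pvStepB
        (pvFieldMapping.foldl (fun d fp => d.insert fp.1 "") PySem.Dict.empty,
          PySem.Dict.empty)).1).items
  set el : PySem.Dict String String :=
    extracted.foldl (fun d p => d.insert (pvNormKey p.1) p.2) PySem.Dict.empty with hel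
  set r0 : PySem.Dict String String :=
    pvFieldMapping.foldl (fun d fp => d.insert fp.1 "") PySem.Dict.empty with hr0
  have hndK : el.keys.Nodup := by
    rw [hel]
    exact PySem.Dict.nodup_keys_foldl_insert_key extracted (fun p => pvNormKey p.1)
      (fun d p => p.2) PySem.Dict.empty PySem.Dict.nodup_keys_empty
  have hndI : (el.items.map Prod.fst).Nodup := hndK
  -- A side: one appended entry per field
  rw [pvItemsA el pvFieldMapping PySem.Dict.empty
      (fun fp _ => PySem.Dict.contains_empty _) (by decide)]
  -- B side: items via keys
  have hcont0 : ∀ q ∈ pvAliasIndex.items, r0.contains q.2.1 = true := by rw [hr0]; decide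
  have hkeys : (el.items.foldl pvStepB (r0, PySem.Dict.empty)).1.keys = r0.keys :=
    pvKeysB el.items (r0, PySem.Dict.empty) hcont0
  have hr0keys : r0.keys = pvFieldMapping.map Prod.fst := by rw [hr0]; decide
  have hndB : (el.items.foldl pvStepB (r0, PySem.Dict.empty)).1.keys.Nodup := by
    rw [hkeys, hr0keys]; decide
  rw [PySem.Dict.items_eq_map_keys _ hndB "", hkeys, hr0keys, List.map_map]
  simp only [show (PySem.Dict.empty : PySem.Dict String String).items = [] from rfl, List.nil_append]
  have hr0getAll : ∀ fq ∈ pvFieldMapping,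
      (pvFieldMapping.foldl (fun d fp => d.insert fp.1 "") PySem.Dict.empty).getD fq.1 "" = "" := by
    decide
  apply List.map_congr_left
  intro fp hfp
  have hproj := pvProj fp.1 el.items (r0, PySem.Dict.empty)
  have h1 : ((el.items.foldl pvStepB (r0, PySem.Dict.empty)).1).getD fp.1 "" =
      (pvFF fp.1 (r0.getD fp.1 "", PySem.Dict.empty.get? fp.1) el.items).1 :=
    congrArg Prod.fst hproj
  have hr0get : r0.getD fp.1 "" = "" := by rw [hr0]; exact hr0getAll fp hfp
  have hM := pvM fp.1 fp.2 (pvFieldOK_all fp hfp) el.items hndI ""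
    (none : Option Int)
  rw [show PySem.Dict.mk el.items = el from rfl] at hM
  rw [show pvTakeB fp.2 none = fp.2 from rfl] at hM
  show (fp.1, pvAVal el fp) = (fp.1, ((el.items.foldl pvStepB (r0, PySem.Dict.empty)).1).getD fp.1 "")
  rw [h1, hr0get]
  rw [show (PySem.Dict.empty : PySem.Dict String Int).get? fp.1 = (none : Option Int) from rfl]
  rw [hM]
  unfold pvAVal
  rfl
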